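-- pv_equiv track=rewrite | github.com/BKZhao/MIMIC-Papers-Repro-Agent | src/repro_agent/legacy/pipeline.py | _summarize_section_summaries
-- ===== SOURCE A (Python) =====
-- from typing import Any
--
-- def _summarize_section_summaries(sections: dict[str, dict[str, Any]]) -> dict[str, int]:
--     summary = {"total": 0, "pass": 0, "warn": 0, "fail": 0, "missing": 0}
--     for payload in sections.values():
--         section_summary = dict(payload.get("summary", {}))
--         summary["total"] += int(section_summary.get("total", 0))
--         summary["pass"] += int(section_summary.get("pass", 0))
--         summary["warn"] += int(section_summary.get("warn", 0))
--         summary["fail"] += int(section_summary.get("fail", 0))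
--         summary["missing"] += int(section_summary.get("missing", 0))
--     return summary
-- ===== SOURCE B (Python) =====
-- def _summarize_section_summaries(sections: dict[str, dict] ) -> dict[str, int]:
--     keys = ("total", "pass", "warn", "fail", "missing")
--     return {
--         key: sum(int(dict(payload.get("summary", {})).get(key, 0)) for payload in sections.values())
--         for key in keys
--     }
-- ===== Notes on version B (the rewrite author's own statement) =====
-- stated objective: simpler
-- what changed: B replaces A's single pass over sections that mutates five dict counters in place with a dict comprehension over the five fixed keys, each key summed across all sections with sum().
import Mathlib
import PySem

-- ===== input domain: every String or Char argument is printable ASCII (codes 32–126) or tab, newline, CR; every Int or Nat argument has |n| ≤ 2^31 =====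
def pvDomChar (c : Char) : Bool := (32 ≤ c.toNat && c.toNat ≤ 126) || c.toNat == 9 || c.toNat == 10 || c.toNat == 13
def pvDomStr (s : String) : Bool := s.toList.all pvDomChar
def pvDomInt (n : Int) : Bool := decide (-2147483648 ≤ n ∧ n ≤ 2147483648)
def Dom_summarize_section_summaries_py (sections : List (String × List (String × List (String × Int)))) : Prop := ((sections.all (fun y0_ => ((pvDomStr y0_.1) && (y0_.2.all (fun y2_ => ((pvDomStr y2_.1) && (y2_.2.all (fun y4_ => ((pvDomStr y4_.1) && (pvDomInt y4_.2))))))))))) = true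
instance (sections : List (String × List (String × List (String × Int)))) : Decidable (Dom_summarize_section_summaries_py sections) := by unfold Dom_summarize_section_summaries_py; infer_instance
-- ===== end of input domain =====

-- B inverts the loop nesting: instead of A's single pass over sections updating five dict
-- counters in place, B maps over the five fixed keys and sums each across all sections (simpler).

-- ===== PORT A =====
-- per-section summary dict: dict(payload.get("summary", {}))
def pvSectionSummary (payload : String × List (String × List (String × Int))) : PySem.Dict String Int :=
  PySem.Dict.ofList ((PySem.Dict.mk payload.2).getD "summary" [])

def summarize_section_summaries_py (sections : List (String × List (String × List (String × Int)))) : List (String × Int) :=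
  let summary : PySem.Dict String Int :=
    PySem.Dict.ofList [("total", 0), ("pass", 0), ("warn", 0), ("fail", 0), ("missing", 0)]
  let summary := sections.foldl (fun summary payload =>
    let section_summary := pvSectionSummary payload
    let summary := summary.modify "total" 0 (· + section_summary.getD "total" 0)
    let summary := summary.modify "pass" 0 (· + section_summary.getD "pass" 0)
    let summary := summary.modify "warn" 0 (· + section_summary.getD "warn" 0)
    let summary := summary.modify "fail" 0 (· + section_summary.getD "fail" 0)
    summary.modify "missing" 0 (· + section_summary.getD "missing" 0)) summary
  summary.items

-- ===== PORT B =====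
def summarize_section_summaries_py_alt (sections : List (String × List (String × List (String × Int)))) : List (String × Int) :=
  ["total", "pass", "warn", "fail", "missing"].map (fun key =>
    (key, (sections.map (fun payload =>
      (PySem.Dict.ofList ((PySem.Dict.mk payload.2).getD "summary" [])).getD key 0)).sum))

-- ===== PRECONDITION & SPEC =====
def Spec_summarize_section_summaries_py (sections : List (String × List (String × List (String × Int)))) (out : List (String × Int)) : Prop := out = summarize_section_summaries_py_alt sections
instance (sections : List (String × List (String × List (String × Int)))) (out : List (String × Int)) : Decidable (Spec_summarize_section_summaries_py sections out) := by unfold Spec_summarize_section_summaries_py; infer_instance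

-- ===== CLAIM (what is proved, stated in full; the proofs are below) =====
def Claim_equal_summarize_section_summaries_py : Prop := ∀ (sections : List (String × List (String × List (String × Int)))), Dom_summarize_section_summaries_py sections → Spec_summarize_section_summaries_py sections (summarize_section_summaries_py sections)

-- ===== LEMMAS AND PROOFS =====

-- the five-counter dict A's loop maintains
def pvFive (a b c d e : Int) : PySem.Dict String Int :=
  PySem.Dict.mk [("total", a), ("pass", b), ("warn", c), ("fail", d), ("missing", e)]

-- sum of one counter key across the remaining sections
def pvKeySum (key : String) (l : List (String × List (String × List (String × Int)))) : Int :=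
  (l.map (fun payload => (pvSectionSummary payload).getD key 0)).sum

lemma pvStep_five (a b c d e : Int) (payload : String × List (String × List (String × Int))) :
    (let section_summary := pvSectionSummary payload
     let s := (pvFive a b c d e).modify "total" 0 (· + section_summary.getD "total" 0)
     let s := s.modify "pass" 0 (· + section_summary.getD "pass" 0)
     let s := s.modify "warn" 0 (· + section_summary.getD "warn" 0)
     let s := s.modify "fail" 0 (· + section_summary.getD "fail" 0)
     s.modify "missing" 0 (· + section_summary.getD "missing" 0)) =
    pvFive (a + (pvSectionSummary payload).getD "total" 0)
           (b + (pvSectionSummary payload).getD "pass" 0)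
           (c + (pvSectionSummary payload).getD "warn" 0)
           (d + (pvSectionSummary payload).getD "fail" 0)
           (e + (pvSectionSummary payload).getD "missing" 0) := by
  rfl

lemma pvFoldl_five (l : List (String × List (String × List (String × Int))))
    (a b c d e : Int) :
    l.foldl (fun summary payload =>
      let section_summary := pvSectionSummary payload
      let summary := summary.modify "total" 0 (· + section_summary.getD "total" 0)
      let summary := summary.modify "pass" 0 (· + section_summary.getD "pass" 0)
      let summary := summary.modify "warn" 0 (· + section_summary.getD "warn" 0)
      let summary := summary.modify "fail" 0 (· + section_summary.getD "fail" 0)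
      summary.modify "missing" 0 (· + section_summary.getD "missing" 0)) (pvFive a b c d e) =
    pvFive (a + pvKeySum "total" l) (b + pvKeySum "pass" l) (c + pvKeySum "warn" l)
           (d + pvKeySum "fail" l) (e + pvKeySum "missing" l) := by
  induction l generalizing a b c d e with
  | nil => simp [pvKeySum]
  | cons p t ih =>
    rw [List.foldl_cons, pvStep_five, ih]
    simp [pvKeySum, add_assoc]

-- ===== VERDICT (by name: the statement is the Claim_ definition above) =====
theorem summarize_section_summaries_py_spec : Claim_equal_summarize_section_summaries_py := by
  intro sections _
  unfold Spec_summarize_section_summaries_py summarize_section_summaries_py summarize_section_summaries_py_alt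
  show (List.foldl _ (PySem.Dict.ofList [("total", (0:Int)), ("pass", 0), ("warn", 0), ("fail", 0), ("missing", 0)])
        sections).items = _
  have h0 : PySem.Dict.ofList [("total", (0:Int)), ("pass", 0), ("warn", 0), ("fail", 0), ("missing", 0)] = pvFive 0 0 0 0 0 := by rfl
  rw [h0, pvFoldl_five]
  simp [pvFive, pvKeySum, pvSectionSummary]
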